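-- pv_equiv track=rewrite | github.com/oalhait/g-lock-app | raspberrypi/detect.py | who
-- ===== SOURCE A (Python) =====
-- def who(s):
--     if s.startswith("joel"):
--         return 0
--     elif s.startswith("obed"):
--         return 1
--     elif s.startswith("mal"):
--         return 2
--     elif s.startswith("omar"):
--         return 3
--     # elif s.startswith("matt"):
--     #   return 4
--     elif s.startswith("chris"):
--         return 4
--     elif s.startswith("chin"):
--         return 5
--     elif s.startswith("test"):
--         return -1 * (who(s[3:]) + 1)
--     else:
--         return -100
-- ===== SOURCE B (Python) =====
-- def who(s):
--     # Iterative: peel "test" prefixes (3 chars each) counting them, look up the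
--     # remainder in a prefix table, then apply x -> -(x+1) once per peel (parity).
--     d = 0
--     while s.startswith("test"):
--         s = s[3:]
--         d += 1
--     v = -100
--     for p, i in [("joel", 0), ("obed", 1), ("mal", 2), ("omar", 3), ("chris", 4), ("chin", 5)]:
--         if s.startswith(p):
--             v = i
--             break
--     return v if d % 2 == 0 else -(v + 1)
-- ===== Notes on version B (the rewrite author's own statement) =====
-- stated objective: alternative
-- what changed: B replaces A's self-recursion with an explicit peel loop that counts stripped 'test' prefixes, a table lookup for the base id, and a parity-based application of the x -> -(x+1) transform.
import Mathlib
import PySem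

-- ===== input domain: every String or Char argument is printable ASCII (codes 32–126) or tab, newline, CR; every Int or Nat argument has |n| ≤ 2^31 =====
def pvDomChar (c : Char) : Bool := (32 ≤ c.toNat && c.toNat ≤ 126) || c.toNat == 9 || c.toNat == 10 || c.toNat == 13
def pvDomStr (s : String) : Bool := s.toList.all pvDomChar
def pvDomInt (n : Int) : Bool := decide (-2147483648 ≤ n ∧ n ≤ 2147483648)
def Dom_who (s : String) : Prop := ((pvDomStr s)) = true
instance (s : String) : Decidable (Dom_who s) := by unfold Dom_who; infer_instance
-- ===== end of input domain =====

-- B replaces A's recursion with an iterative peel/lookup/parity structure; same values everywhere.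

-- ===== PORT A =====
-- A, transliterated on the code-point list: the if/elif chain in source order,
-- s[3:] = drop 3 (exact for a nonnegative bound), recursion as in A.
def whoL (l : List Char) : Int :=
  if PySem.Chars.startswith l "joel".toList then 0
  else if PySem.Chars.startswith l "obed".toList then 1
  else if PySem.Chars.startswith l "mal".toList then 2
  else if PySem.Chars.startswith l "omar".toList then 3
  else if PySem.Chars.startswith l "chris".toList then 4
  else if PySem.Chars.startswith l "chin".toList then 5
  else if PySem.Chars.startswith l "test".toList then -1 * (whoL (l.drop 3) + 1)
  else -100
termination_by l.length
decreasing_by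
  have h4 : 4 ≤ l.length := by
    have := (PySem.Chars.startswith_iff (s := l) (p := "test".toList)).mp (by assumption)
    simpa using this.length_le
  simp only [List.length_drop]; omega

def who (s : String) : Int := whoL s.toList

-- ===== PORT B =====
-- B's while loop: strip "test" (3 chars) repeatedly, counting the peels.
def peelTest (l : List Char) : Nat × List Char :=
  if PySem.Chars.startswith l "test".toList then
    let p := peelTest (l.drop 3)
    (p.1 + 1, p.2)
  else (0, l)
termination_by l.length
decreasing_by
  have h4 : 4 ≤ l.length := by
    have := (PySem.Chars.startswith_iff (s := l) (p := "test".toList)).mp (by assumption)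
    simpa using this.length_le
  simp only [List.length_drop]; omega

-- B's for loop over the prefix table with break (first match wins, default -100).
def lookupBase : List (List Char × Int) → List Char → Int
  | [], _ => -100
  | (p, i) :: t, l => if PySem.Chars.startswith l p then i else lookupBase t l

def baseTable : List (List Char × Int) :=
  [("joel".toList, 0), ("obed".toList, 1), ("mal".toList, 2),
   ("omar".toList, 3), ("chris".toList, 4), ("chin".toList, 5)]

def whoAltL (l : List Char) : Int :=
  let p := peelTest l
  let v := lookupBase baseTable p.2
  if p.1 % 2 == 0 then v else -(v + 1)

def who_alt (s : String) : Int := whoAltL s.toList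

-- ===== PRECONDITION & SPEC =====
def Spec_who (s : String) (out : Int) : Prop := out = who_alt s
instance (s : String) (out : Int) : Decidable (Spec_who s out) := by unfold Spec_who; infer_instance

-- ===== CLAIM (what is proved, stated in full; the proofs are below) =====
def Claim_equal_who : Prop := ∀ (s : String), Dom_who s → Spec_who s (who s)

-- ===== LEMMAS AND PROOFS =====

lemma test_prefix_shape {l : List Char} (h : PySem.Chars.startswith l "test".toList = true) :
    ∃ r, l = 't' :: 'e' :: 's' :: 't' :: r := by
  obtain ⟨r, hr⟩ := (PySem.Chars.startswith_iff (s := l) (p := "test".toList)).mp h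
  exact ⟨r, hr.symm⟩

lemma whoL_eq_whoAltL : ∀ n l, l.length ≤ n → whoL l = whoAltL l := by
  intro n
  induction n with
  | zero =>
    intro l hl
    have hnil : l = [] := List.eq_nil_of_length_eq_zero (Nat.le_zero.mp hl)
    subst hnil
    rw [whoL, whoAltL, peelTest]
    simp [PySem.Chars.startswith, List.isPrefixOf, lookupBase, baseTable]
  | succ n ih =>
    intro l hl
    by_cases ht : PySem.Chars.startswith l "test".toList = true
    · obtain ⟨r, hr⟩ := test_prefix_shape ht
      subst hr
      have hd : ('t'::'e'::'s'::'t'::r).drop 3 = 't'::r := rfl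
      -- the six named prefixes all fail (first character is 't')
      rw [whoL]
      rw [if_neg (by simp [PySem.Chars.startswith, List.isPrefixOf]),
          if_neg (by simp [PySem.Chars.startswith, List.isPrefixOf]),
          if_neg (by simp [PySem.Chars.startswith, List.isPrefixOf]),
          if_neg (by simp [PySem.Chars.startswith, List.isPrefixOf]),
          if_neg (by simp [PySem.Chars.startswith, List.isPrefixOf]),
          if_neg (by simp [PySem.Chars.startswith, List.isPrefixOf]),
          if_pos ht, hd]
      have hlen : ('t'::r).length ≤ n := by simp at hl ⊢; omega
      rw [ih _ hlen]
      conv_rhs => rw [whoAltL, peelTest, if_pos ht, hd]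
      rw [whoAltL]
      set d := (peelTest ('t'::r)).1 with hdd
      set v := lookupBase baseTable (peelTest ('t'::r)).2 with hv
      rcases Nat.even_or_odd d with he | ho
      · have h0 : d % 2 = 0 := Nat.even_iff.mp he
        have h1 : (d + 1) % 2 = 1 := by omega
        simp only [h0]
        norm_num
        omega
      · have h1 : d % 2 = 1 := Nat.odd_iff.mp ho
        simp only [h1]
        norm_num
        omega
    · -- no "test" prefix: no peel, B is the table lookup = A's if-chain minus the test branch
      rw [whoL, whoAltL, peelTest, if_neg ht]
      simp only [lookupBase, baseTable, ht]
      norm_num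

-- ===== VERDICT (by name: the statement is the Claim_ definition above) =====
theorem who_spec : Claim_equal_who := by
  intro s _
  unfold Spec_who who who_alt
  exact whoL_eq_whoAltL s.toList.length s.toList le_rfl
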